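-- pv_equiv track=rewrite | github.com/dotcomaki/BSCS1002_Python | Week 12/PPA1.py | primes_galore
-- ===== SOURCE A (Python) =====
-- def primes_galore(L):
--     def is_prime(n):
--         if n < 2:
--             return False
--         for i in range(2, n):
--             if n % i == 0:
--                 return False
--         return True
--
--     count = 0
--     for i in range(len(L)):
--         if is_prime(i) and is_prime(L[i]):
--             count += 1
--     return count
-- ===== SOURCE B (Python) =====
-- def primes_galore(L):
--     # Largest number that will ever be primality-tested (an index or an element).
--     bound = max([len(L) - 1] + L)
--     # Smallest s >= 1 with s*s >= bound.
--     s = 1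
--     while s * s < bound:
--         s += 1
--
--     # Prime table up to s = sqrt(bound), built by odd trial division.
--     def small_prime(q):
--         if q < 2:
--             return False
--         if q % 2 == 0:
--             return q == 2
--         d = 3
--         while d * d <= q:
--             if q % d == 0:
--                 return False
--             d += 2
--         return True
--
--     primes = [q for q in range(2, s + 1) if small_prime(q)]
--
--     # x (<= bound) is prime iff x >= 2 and no table prime p with p*p <= x divides x.
--     def no_factor(x):
--         for p in primes:
--             if p * p > x:
--                 break
--             if x % p == 0:
--                 return False
--         return True
--
--     count = 0
--     for i, v in enumerate(L):
--         if i >= 2 and no_factor(i) and v >= 2 and no_factor(v):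
--             count += 1
--     return count
-- ===== Notes on version B (the rewrite author's own statement) =====
-- stated objective: faster
-- what changed: B builds a table of the primes up to sqrt(max(len(L)-1, max(L))) once (odd trial division) and tests each index and element by trial division against that table with an early break, instead of A's per-element trial division over all of range(2, n).
import Mathlib
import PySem

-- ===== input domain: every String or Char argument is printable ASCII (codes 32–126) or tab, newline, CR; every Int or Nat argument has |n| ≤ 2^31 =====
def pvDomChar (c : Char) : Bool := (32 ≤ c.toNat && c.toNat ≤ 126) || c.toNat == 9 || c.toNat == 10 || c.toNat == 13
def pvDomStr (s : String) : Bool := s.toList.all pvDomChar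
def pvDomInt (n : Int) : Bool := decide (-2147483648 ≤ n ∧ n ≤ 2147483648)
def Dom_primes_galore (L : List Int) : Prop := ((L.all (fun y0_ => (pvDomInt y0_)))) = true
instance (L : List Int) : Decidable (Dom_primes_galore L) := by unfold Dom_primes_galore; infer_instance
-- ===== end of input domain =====

-- B builds the prime table up to sqrt(max(len(L)-1, max(L))) once and tests every index
-- and element by trial division against that table, instead of A's per-element trial
-- division over all of range(2, n); objective: faster.

-- ===== PORT A =====
-- A's is_prime loop 'for i in range(2, n): if n % i == 0: return False' as an
-- early-exit recursion over i = 2, 3, …, n-1 (fuel = the range's length, (n-2).toNat).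
def pvScanA (n : Int) : Nat → Int → Bool
  | 0, _ => true
  | fuel + 1, i => if PySem.Int.mod n i == 0 then false else pvScanA n fuel (i + 1)

def pvIsPrimeA (n : Int) : Bool :=
  if n < 2 then false else pvScanA n (n - 2).toNat 2

def primes_galore (L : List Int) : Int :=
  (PySem.List.pyRange 0 (L.length : Int) 1).foldl
    (fun count i =>
      if pvIsPrimeA i && pvIsPrimeA (PySem.List.pyGetD L i 0) then count + 1 else count) 0

-- ===== PORT B =====
-- B's 's = 1; while s*s < bound: s += 1' (fuel = bound.toNat makes the loop total:
-- s never needs to pass bound itself).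
def pvGrow (bound : Int) : Nat → Int → Int
  | 0, s => s
  | fuel + 1, s => if s * s < bound then pvGrow bound fuel (s + 1) else s

-- B's 'd = 3; while d*d <= q: if q % d == 0: return False; d += 2' (fuel = q.toNat: the
-- loop exits once d*d > q, and d only grows).
def pvOddScan (q : Int) : Nat → Int → Bool
  | 0, _ => true
  | fuel + 1, d =>
    if d * d ≤ q then
      if PySem.Int.mod q d == 0 then false else pvOddScan q fuel (d + 2)
    else true

-- B's small_prime
def pvSmallPrime (q : Int) : Bool :=
  if q < 2 then false
  else if PySem.Int.mod q 2 == 0 then q == 2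
  else pvOddScan q q.toNat 3

-- B's no_factor: 'for p in primes: if p*p > x: break; if x % p == 0: return False'
def pvNoFactor : List Int → Int → Bool
  | [], _ => true
  | p :: ps, x =>
    if p * p > x then true
    else if PySem.Int.mod x p == 0 then false
    else pvNoFactor ps x

def primes_galore_alt (L : List Int) : Int :=
  let bound := PySem.List.maxD (((L.length : Int) - 1) :: L) (fun x => x) 0
  let s := pvGrow bound bound.toNat 1
  let primes := (PySem.List.pyRange 2 (s + 1) 1).filter pvSmallPrime
  (PySem.List.enumerate L 0).foldl
    (fun count p =>
      if decide (2 ≤ p.1) && pvNoFactor primes p.1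
         && decide (2 ≤ p.2) && pvNoFactor primes p.2
      then count + 1 else count) 0

-- ===== PRECONDITION & SPEC =====
def Spec_primes_galore (L : List Int) (out : Int) : Prop := out = primes_galore_alt L
instance (L : List Int) (out : Int) : Decidable (Spec_primes_galore L out) := by unfold Spec_primes_galore; infer_instance

-- ===== CLAIM (what is proved, stated in full; the proofs are below) =====
def Claim_equal_primes_galore : Prop := ∀ (L : List Int), Dom_primes_galore L → Spec_primes_galore L (primes_galore L)

-- ===== LEMMAS AND PROOFS =====

lemma pvScanA_iff (n : Int) :
    ∀ (fuel : Nat) (i : Int), (fuel : Int) + i = n → 2 ≤ i →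
      (pvScanA n fuel i = true ↔ ∀ d : Int, i ≤ d → d < n → ¬ d ∣ n) := by
  intro fuel
  induction fuel with
  | zero =>
    intro i hf hi
    simp only [pvScanA, true_iff]
    intro d hd hdn
    omega
  | succ fuel ih =>
    intro i hf hi
    simp only [pvScanA]
    split_ifs with hmod
    · rw [beq_iff_eq, PySem.Int.mod_eq_zero_iff_dvd] at hmod
      simp only [false_iff, not_forall]
      exact ⟨i, le_refl i, by push_cast at hf; omega, by simpa using hmod⟩
    · rw [ih (i + 1) (by push_cast at hf ⊢; omega) (by omega)]
      rw [beq_iff_eq, PySem.Int.mod_eq_zero_iff_dvd] at hmod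
      constructor
      · intro h d hd hdn
        rcases eq_or_lt_of_le hd with rfl | hlt
        · exact hmod
        · exact h d (by omega) hdn
      · intro h d hd hdn; exact h d (by omega) hdn

lemma pvIsPrimeA_iff (n : Int) :
    pvIsPrimeA n = true ↔ 2 ≤ n ∧ ∀ d : Int, 2 ≤ d → d < n → ¬ d ∣ n := by
  unfold pvIsPrimeA
  split_ifs with h
  · simp; omega
  · rw [pvScanA_iff n (n - 2).toNat 2 (by omega) (by omega)]
    constructor
    · exact fun hall => ⟨by omega, fun d h2 => hall d h2⟩
    · rintro ⟨-, hnd⟩ d hd; exact hnd d hd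

-- proper divisors below n vs divisors up to sqrt(n)
lemma pvDivisor_bridge (n : Int) (hn : 2 ≤ n) :
    (∀ d : Int, 2 ≤ d → d < n → ¬ d ∣ n) ↔ (∀ d : Int, 2 ≤ d → d * d ≤ n → ¬ d ∣ n) := by
  constructor
  · intro h d hd hdd hdvd
    rcases lt_or_ge d n with hlt | hge
    · exact h d hd hlt hdvd
    · nlinarith
  · intro h d hd hlt hdvd
    rcases lt_or_ge n (d * d) with hdd | hdd
    swap
    · exact h d hd hdd hdvd
    · obtain ⟨e, he⟩ := hdvd
      have hdpos : 0 < d := by omega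
      have hepos : 0 < e := by nlinarith
      have he2 : 2 ≤ e := by
        rcases (by omega : e = 1 ∨ 2 ≤ e) with rfl | h2
        · omega
        · exact h2
      have hee : e * e ≤ n := by nlinarith
      exact h e he2 hee ⟨d, by rw [he, mul_comm]⟩

-- every divisor d ≥ 2 of x sits above a divisor of x with no proper divisor of its own
lemma pvLeastDiv : ∀ (n : Nat) (d x : Int), d.toNat ≤ n → 2 ≤ d → d ∣ x →
    ∃ q : Int, 2 ≤ q ∧ q ≤ d ∧ q ∣ x ∧ ∀ e : Int, 2 ≤ e → e < q → ¬ e ∣ q := by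
  intro n
  induction n with
  | zero => intro d x hn hd _; omega
  | succ n ih =>
    intro d x hn hd hdx
    by_cases hp : ∀ e : Int, 2 ≤ e → e < d → ¬ e ∣ d
    · exact ⟨d, hd, le_refl d, hdx, hp⟩
    · rw [not_forall] at hp
      obtain ⟨e, hev⟩ := hp
      rw [Classical.not_imp, Classical.not_imp, not_not] at hev
      obtain ⟨he2, hed, hede⟩ := hev
      obtain ⟨q, hq2, hqe, hqx, hqp⟩ := ih e x (by omega) he2 (hede.trans hdx)
      exact ⟨q, hq2, by omega, hqx, hqp⟩

-- the searched bound: pvGrow returns some s ≥ start with bound ≤ s*s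
lemma pvGrow_spec (bound : Int) :
    ∀ (fuel : Nat) (s : Int), 1 ≤ s → bound ≤ (fuel : Int) + s →
      s ≤ pvGrow bound fuel s ∧ bound ≤ pvGrow bound fuel s * pvGrow bound fuel s := by
  intro fuel
  induction fuel with
  | zero =>
    intro s hs hf
    simp only [pvGrow]
    refine ⟨le_refl s, ?_⟩
    push_cast at hf
    nlinarith
  | succ fuel ih =>
    intro s hs hf
    simp only [pvGrow]
    split_ifs with hss
    · obtain ⟨h1, h2⟩ := ih (s + 1) (by omega) (by push_cast at hf ⊢; omega)
      exact ⟨by omega, h2⟩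
    · exact ⟨le_refl s, by omega⟩

-- the odd trial-division loop: true iff no divisor of q of d's parity from d up to sqrt(q)
lemma pvOddScan_iff (q : Int) :
    ∀ (fuel : Nat) (d : Int), 3 ≤ d → q < 2 * (fuel : Int) + d →
      (pvOddScan q fuel d = true ↔
        ∀ e : Int, d ≤ e → (e - d) % 2 = 0 → e * e ≤ q → ¬ e ∣ q) := by
  intro fuel
  induction fuel with
  | zero =>
    intro d hd hf
    simp only [pvOddScan, true_iff]
    intro e hde hpar hee
    push_cast at hf
    exfalso; nlinarith
  | succ fuel ih =>
    intro d hd hf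
    simp only [pvOddScan]
    split_ifs with hdd hmod
    · rw [beq_iff_eq, PySem.Int.mod_eq_zero_iff_dvd] at hmod
      simp only [false_iff, not_forall]
      refine ⟨d, le_refl d, ?_⟩
      simp [hdd, hmod]
    · rw [beq_iff_eq, PySem.Int.mod_eq_zero_iff_dvd] at hmod
      rw [ih (d + 2) (by omega) (by push_cast at hf ⊢; omega)]
      constructor
      · intro h e hde hpar hee hedvd
        rcases (by omega : e = d ∨ d + 2 ≤ e) with rfl | hlt
        · exact hmod hedvd
        · exact h e hlt (by omega) hee hedvd
      · intro h e hde hpar hee hedvd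
        exact h e (by omega) (by omega) hee hedvd
    · simp only [true_iff]
      intro e hde hpar hee
      exfalso; nlinarith

-- B's small_prime agrees with A's is_prime everywhere
lemma pvSmallPrime_eq (q : Int) : pvSmallPrime q = pvIsPrimeA q := by
  by_cases h1 : q < 2
  · unfold pvSmallPrime pvIsPrimeA
    simp [h1]
  · have hmod2 : PySem.Int.mod q 2 = q % 2 := PySem.Int.mod_eq_emod_of_pos (by omega)
    by_cases hev : PySem.Int.mod q 2 = 0
    · have h2q : (2:Int) ∣ q := (PySem.Int.mod_eq_zero_iff_dvd _ _).mp hev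
      have hB : pvSmallPrime q = (q == 2) := by
        unfold pvSmallPrime
        rw [if_neg h1, if_pos (show (PySem.Int.mod q 2 == 0) = true by simpa using h2q)]
      by_cases hq2 : q = 2
      · subst hq2; rw [hB]; decide
      · have hA : pvIsPrimeA q = false := by
          rw [← Bool.not_eq_true, pvIsPrimeA_iff]
          rintro ⟨-, hnd⟩
          exact hnd 2 (le_refl 2) (by omega) h2q
        rw [hB, hA]
        simp [hq2]
    · have hodd : q % 2 = 1 := by omega
      have hB : pvSmallPrime q = pvOddScan q q.toNat 3 := by
        unfold pvSmallPrime
        rw [if_neg h1, if_neg (show ¬ ((PySem.Int.mod q 2 == 0) = true) by simpa using hodd)]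
      rw [hB, Bool.eq_iff_iff,
        pvOddScan_iff q q.toNat 3 (by omega) (by omega), pvIsPrimeA_iff]
      constructor
      · intro h
        refine ⟨by omega, (pvDivisor_bridge q (by omega)).mpr ?_⟩
        intro e he2 hee hedvd
        by_cases hpar : e % 2 = 0
        · have h2e : (2:Int) ∣ e := by omega
          have h2q : (2:Int) ∣ q := h2e.trans hedvd
          omega
        · exact h e (by omega) (by omega) hee hedvd
      · rintro ⟨-, hnd⟩ e hde hpar hee hedvd
        exact (pvDivisor_bridge q (by omega)).mp hnd e (by omega) hee hedvd

-- the break in no_factor is sound on a sorted list of numbers ≥ 2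
lemma pvNoFactor_iff (x : Int) :
    ∀ ps : List Int, (∀ p ∈ ps, 2 ≤ p) → ps.Pairwise (· ≤ ·) →
      (pvNoFactor ps x = true ↔ ∀ p ∈ ps, p * p ≤ x → ¬ p ∣ x) := by
  intro ps
  induction ps with
  | nil => intro _ _; simp [pvNoFactor]
  | cons p ps ih =>
    intro hpos hpair
    rw [List.pairwise_cons] at hpair
    obtain ⟨hle, hpair'⟩ := hpair
    have hp2 : 2 ≤ p := hpos p List.mem_cons_self
    simp only [pvNoFactor]
    split_ifs with hgt hmod
    · simp only [true_iff]
      intro r hr hrr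
      rcases List.mem_cons.mp hr with rfl | hr'
      · exfalso; omega
      · have := hle r hr'
        exfalso; nlinarith
    · rw [beq_iff_eq, PySem.Int.mod_eq_zero_iff_dvd] at hmod
      simp only [false_iff, not_forall]
      exact ⟨p, List.mem_cons_self, by omega, not_not_intro hmod⟩
    · rw [beq_iff_eq, PySem.Int.mod_eq_zero_iff_dvd] at hmod
      rw [ih (fun r hr => hpos r (List.mem_cons_of_mem p hr)) hpair']
      constructor
      · intro h r hr
        rcases List.mem_cons.mp hr with rfl | hr'
        · intro _; exact hmod
        · exact h r hr'
      · intro h r hr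
        exact h r (List.mem_cons_of_mem p hr)

-- B's table test (2 ≤ x and no table prime divides x) equals A's is_prime, for x ≤ s*s
lemma pvTest_eq (s x : Int) (hs : 1 ≤ s) (hx : x ≤ s * s) :
    (decide (2 ≤ x)
        && pvNoFactor ((PySem.List.pyRange 2 (s + 1) 1).filter pvSmallPrime) x)
      = pvIsPrimeA x := by
  rw [List.filter_congr (fun a _ => pvSmallPrime_eq a)]
  have hpos : ∀ p ∈ (PySem.List.pyRange 2 (s + 1) 1).filter pvIsPrimeA, 2 ≤ p := by
    intro p hp
    have := (List.mem_filter.mp hp).1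
    rw [PySem.List.mem_pyRange_one] at this
    omega
  have hpair : ((PySem.List.pyRange 2 (s + 1) 1).filter pvIsPrimeA).Pairwise (· ≤ ·) :=
    ((PySem.List.pairwise_lt_pyRange_one 2 (s + 1)).filter _).imp le_of_lt
  by_cases h2 : 2 ≤ x
  · rw [Bool.eq_iff_iff]
    simp only [h2, decide_true, Bool.true_and]
    rw [pvNoFactor_iff x _ hpos hpair, pvIsPrimeA_iff]
    constructor
    · intro hall
      refine ⟨h2, (pvDivisor_bridge x h2).mpr ?_⟩
      intro d hd2 hdd hdvd
      obtain ⟨q, hq2, hqd, hqx, hqp⟩ := pvLeastDiv d.toNat d x (le_refl _) hd2 hdvd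
      have hqq : q * q ≤ x := by nlinarith
      have hqs : q ≤ s := by nlinarith
      have hqP : q ∈ (PySem.List.pyRange 2 (s + 1) 1).filter pvIsPrimeA :=
        List.mem_filter.mpr ⟨PySem.List.mem_pyRange_one.mpr ⟨hq2, by omega⟩,
          (pvIsPrimeA_iff q).mpr ⟨hq2, hqp⟩⟩
      exact hall q hqP hqq hqx
    · rintro ⟨-, hnd⟩ p hp hpp
      have hA := (List.mem_filter.mp hp).2
      have hp2 : 2 ≤ p := ((pvIsPrimeA_iff p).mp hA).1
      exact (pvDivisor_bridge x h2).mp hnd p hp2 hpp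
  · have hA : pvIsPrimeA x = false := by
      unfold pvIsPrimeA; simp [show x < 2 by omega]
    simp [h2, hA]

lemma pvMaxD_le (xs : List Int) : ∀ v ∈ xs, v ≤ PySem.List.maxD xs (fun x => x) 0 := by
  intro v hv
  unfold PySem.List.maxD
  cases hmax : PySem.List.max? xs (fun x => x) with
  | none => rw [PySem.List.max?_eq_none_iff] at hmax; simp [hmax] at hv
  | some m => exact PySem.List.max?_isMax hmax v hv

-- ===== VERDICT (by name: the statement is the Claim_ definition above) =====
theorem primes_galore_spec : Claim_equal_primes_galore := by
  intro L _
  unfold Spec_primes_galore primes_galore primes_galore_alt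
  rw [PySem.List.enumerate_eq_map_pyRange (d := 0), List.foldl_map]
  simp only [PySem.List.len_eq]
  set bound := PySem.List.maxD (((L.length : Int) - 1) :: L) (fun x => x) 0 with hbound
  set s := pvGrow bound bound.toNat 1 with hsdef
  have hlen : (L.length : Int) - 1 ≤ bound := pvMaxD_le _ _ (List.mem_cons_self)
  obtain ⟨hs1, hbs⟩ := pvGrow_spec bound bound.toNat 1 (le_refl 1) (by omega)
  rw [← hsdef] at hs1 hbs
  apply Eq.symm
  apply PySem.List.foldl_congr_mem
  intro acc j hj
  rw [PySem.List.mem_pyRange_one] at hj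
  have hjb : j ≤ s * s := le_trans (by omega) hbs
  have hvL : PySem.List.pyGetD L j 0 ∈ (((L.length : Int) - 1) :: L) := by
    rw [PySem.List.pyGetD_eq_getElem L 0 (by omega) (by omega)]
    exact List.mem_cons_of_mem _ (List.getElem_mem _)
  have hv1 : PySem.List.pyGetD L j 0 ≤ bound := hbound ▸ pvMaxD_le _ _ hvL
  have hvb : PySem.List.pyGetD L j 0 ≤ s * s := le_trans hv1 hbs
  rw [Bool.and_assoc, pvTest_eq s j hs1 hjb, pvTest_eq s _ hs1 hvb]
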